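-- pv_equiv track=rewrite | github.com/Yu-Miri/Programmas | 프로그래머스/unrated/138476. 귤 고르기/귤 고르기.py | solution
-- ===== SOURCE A (Python) =====
-- from collections import Counter
--
-- def solution(k, tangerine):
--     cnt = 0
--     k = k
--     tan = sorted(Counter(tangerine).items(), key= lambda x:x[1],reverse=True)
--     for scale, num in tan:
--         k -= num
--         cnt += 1
--         if k <= 0:
--             return cnt
-- ===== SOURCE B (Python) =====
-- from collections import Counter
--
-- def solution(k, tangerine):
--     # Complementary greedy: instead of taking the MOST frequent kinds until k
--     # tangerines are gathered, discard the LEAST frequent kinds as long as the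
--     # discarded tangerines fit into the surplus len(tangerine) - k, always
--     # keeping the most frequent kind (at least one kind is picked); the answer
--     # is the number of kinds left.  Correct because keeping the kinds with the
--     # largest counts is the same as discarding the kinds with the smallest ones.
--     freqs = sorted(Counter(tangerine).values())
--     budget = len(tangerine) - k
--     dropped = 0
--     for f in freqs[:-1]:
--         if budget - f < 0:
--             break
--         budget -= f
--         dropped += 1
--     return len(freqs) - dropped
-- ===== Notes on version B (the rewrite author's own statement) =====
-- stated objective: alternative
-- what changed: B solves the complementary problem: instead of greedily taking the most frequent kinds until k tangerines are gathered, it sorts the counts ascending and discards the least frequent kinds (always keeping the most frequent one) while the discarded tangerines fit into the surplus len(tangerine)-k, returning the number of kinds left.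
-- outside the precondition, e.g. on solution(0, []): A returns None, B returns 0; on solution(5, [1, 1]): A returns None, B returns 1
import Mathlib
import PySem

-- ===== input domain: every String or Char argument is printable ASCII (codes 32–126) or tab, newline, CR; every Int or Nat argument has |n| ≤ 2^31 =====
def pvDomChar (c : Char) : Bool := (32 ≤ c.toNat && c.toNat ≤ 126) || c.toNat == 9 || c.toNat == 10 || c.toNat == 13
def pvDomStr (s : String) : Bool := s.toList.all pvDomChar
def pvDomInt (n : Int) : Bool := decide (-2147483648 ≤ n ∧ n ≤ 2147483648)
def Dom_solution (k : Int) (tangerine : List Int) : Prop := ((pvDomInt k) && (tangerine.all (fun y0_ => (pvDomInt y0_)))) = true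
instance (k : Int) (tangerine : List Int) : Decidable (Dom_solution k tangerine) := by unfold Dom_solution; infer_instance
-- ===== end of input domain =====

-- B solves the complementary problem — discard the least frequent kinds (counts sorted
-- ascending, always keeping the most frequent kind) while they fit into the surplus
-- n - k — instead of A's greedy take of the most frequent kinds (objective: alternative
-- algorithm, similar cost).

-- ===== PORT A =====
-- the 'for scale, num in tan' loop; Python returns None when it falls off the end (excluded by Pre_; 0 here)
def solLoopA : List (Int × Int) → Int → Int → Int
  | [], _, _ => 0
  | (_, num) :: rest, k, cnt =>
    let k' := k - num
    let cnt' := cnt + 1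
    if k' ≤ 0 then cnt' else solLoopA rest k' cnt'

def solution (k : Int) (tangerine : List Int) : Int :=
  let tan := PySem.List.sorted (PySem.Dict.counter tangerine).items (fun x => x.2) true
  solLoopA tan k 0

-- ===== PORT B =====
-- the 'for f in freqs[:-1]' loop of Source B: break = stop, returning the dropped-so-far count
def dropLoop : List Int → Int → Int → Int
  | [], _, dropped => dropped
  | f :: rest, budget, dropped =>
    if budget - f < 0 then dropped else dropLoop rest (budget - f) (dropped + 1)

def solution_alt (k : Int) (tangerine : List Int) : Int :=
  let freqs := PySem.List.sorted (PySem.Dict.counter tangerine).values (fun x => x) false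
  let budget := (tangerine.length : Int) - k
  (freqs.length : Int) - dropLoop (PySem.List.slice freqs none (some (-1))) budget 0

-- ===== PRECONDITION & SPEC =====
-- Pre_ excludes exactly the inputs where Python A returns None instead of an int:
-- the empty list, and k larger than the total number of tangerines.
def Pre_solution (k : Int) (tangerine : List Int) : Prop :=
  tangerine ≠ [] ∧ k ≤ (tangerine.length : Int)
instance (k : Int) (tangerine : List Int) : Decidable (Pre_solution k tangerine) := by
  unfold Pre_solution; infer_instance

def pvWitness_solution : Int × List Int := (4, [1, 3, 2, 5, 4, 5, 2, 3])

def Spec_solution (k : Int) (tangerine : List Int) (out : Int) : Prop := out = solution_alt k tangerine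
instance (k : Int) (tangerine : List Int) (out : Int) : Decidable (Spec_solution k tangerine out) := by
  unfold Spec_solution; infer_instance

-- ===== CLAIM (what is proved, stated in full; the proofs are below) =====
def Claim_equal_solution : Prop := ∀ (k : Int) (tangerine : List Int), Dom_solution k tangerine → Pre_solution k tangerine → Spec_solution k tangerine (solution k tangerine)

-- ===== LEMMAS AND PROOFS =====

-- accumulator-free form of A's loop: 1-based index of the first prefix whose sum reaches k
def gHit : List Int → Int → Int
  | [], _ => 0
  | c :: rest, k => if k - c ≤ 0 then 1 else 1 + gHit rest (k - c)

-- accumulator-free form of B's loop: how many leading counts fit into the budget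
def dropCnt : List Int → Int → Int
  | [], _ => 0
  | f :: rest, budget => if budget - f < 0 then 0 else 1 + dropCnt rest (budget - f)

theorem solLoopA_eq_gHit (xs : List (Int × Int)) : ∀ (k cnt : Int),
    xs ≠ [] → k ≤ (xs.map Prod.snd).sum → solLoopA xs k cnt = cnt + gHit (xs.map Prod.snd) k := by
  induction xs with
  | nil => intro k cnt hne _; exact absurd rfl hne
  | cons p rest ih =>
    intro k cnt _ h2
    obtain ⟨s, num⟩ := p
    simp only [solLoopA, gHit, List.map]
    by_cases h : k - num ≤ 0
    · simp [h]
    · simp only [if_neg h]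
      have hrest : rest ≠ [] := by
        intro hr; subst hr; simp at h2; omega
      rw [ih (k - num) (cnt + 1) hrest (by simp at h2 ⊢; omega)]
      ring

theorem dropLoop_eq_dropCnt (xs : List Int) : ∀ (b d : Int),
    dropLoop xs b d = d + dropCnt xs b := by
  induction xs with
  | nil => intro b d; simp [dropLoop, dropCnt]
  | cons f rest ih =>
    intro b d
    simp only [dropLoop, dropCnt]
    split_ifs with h
    · ring
    · rw [ih]; ring

theorem gHit_append_miss (l1 : List Int) : ∀ (l2 : List Int) (k : Int),
    (∀ x ∈ l1, 0 < x) → l1.sum < k →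
    gHit (l1 ++ l2) k = (l1.length : Int) + gHit l2 (k - l1.sum) := by
  induction l1 with
  | nil => intro l2 k _ _; simp
  | cons c r ih =>
    intro l2 k hpos h
    have hr : (0:Int) ≤ r.sum :=
      List.sum_nonneg (fun x hx => le_of_lt (hpos x (List.mem_cons_of_mem _ hx)))
    have hs : c + r.sum < k := by simpa using h
    simp only [List.cons_append, gHit]
    have hc : ¬ (k - c ≤ 0) := by omega
    rw [if_neg hc, ih l2 (k - c) (fun x hx => hpos x (List.mem_cons_of_mem _ hx)) (by omega)]
    simp only [List.length_cons, List.sum_cons]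
    push_cast
    ring_nf

theorem gHit_append_hit (l1 : List Int) : ∀ (l2 : List Int) (k : Int),
    l1 ≠ [] → k ≤ l1.sum → gHit (l1 ++ l2) k = gHit l1 k := by
  induction l1 with
  | nil => intro l2 k hne _; exact absurd rfl hne
  | cons c r ih =>
    intro l2 k _ h2
    simp only [List.cons_append, gHit]
    by_cases h : k - c ≤ 0
    · simp [h]
    · simp only [if_neg h]
      have hr : r ≠ [] := by
        intro hrr; subst hrr; simp at h2; omega
      rw [ih l2 (k - c) hr (by simp at h2; omega)]

-- the heart: taking the most frequent kinds from the back of zs until k is gathered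
-- is the complement of dropping leading counts of zs.dropLast that fit into sum zs - k
theorem gHit_reverse_eq (zs : List Int) : ∀ (k : Int),
    (∀ x ∈ zs, 0 < x) → k ≤ zs.sum →
    gHit zs.reverse k = (zs.length : Int) - dropCnt zs.dropLast (zs.sum - k) := by
  induction zs with
  | nil => intro k _ _; simp [gHit, dropCnt]
  | cons f rest ih =>
    intro k hpos h2
    have hposr : ∀ x ∈ rest, 0 < x := fun x hx => hpos x (List.mem_cons_of_mem _ hx)
    cases rest with
    | nil =>
      have e1 : ([f] : List Int).reverse = [f] := rfl
      have e2 : ([f] : List Int).dropLast = [] := rfl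
      have e3 : ([f] : List Int).sum = f := by simp
      rw [e1, e2]
      simp only [gHit, dropCnt]
      rw [if_pos (by rw [e3] at h2; omega)]
      simp only [List.length_cons, List.length_nil]
      omega
    | cons g t =>
      have hdl : (f :: g :: t).dropLast = f :: (g :: t).dropLast := rfl
      have hsum3 : (f :: g :: t).sum = f + (g :: t).sum := by simp
      rw [List.reverse_cons, hdl]
      simp only [dropCnt]
      by_cases h : (f :: g :: t).sum - k - f < 0
      · -- k > rest.sum: the hit lands on the last element f
        rw [if_pos h]
        rw [gHit_append_miss (g :: t).reverse [f] k
          (fun x hx => hposr x (List.mem_reverse.mp hx))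
          (by rw [List.sum_reverse]; rw [hsum3] at h; omega)]
        simp only [gHit, List.sum_reverse, List.length_reverse]
        rw [if_pos (by rw [hsum3] at h2; omega)]
        simp only [List.length_cons]
        omega
      · -- k ≤ rest.sum: the hit lands inside rest.reverse
        rw [if_neg h]
        have hk : k ≤ (g :: t).sum := by rw [hsum3] at h; omega
        rw [gHit_append_hit (g :: t).reverse [f] k (by simp) (by rw [List.sum_reverse]; exact hk)]
        rw [ih k hposr hk]
        have harg : (f :: g :: t).sum - k - f = (g :: t).sum - k := by rw [hsum3]; ring
        rw [harg]
        simp only [List.length_cons]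
        omega

-- nodup lists with the same members are permutations (used for ofList vs dedup)
theorem perm_of_nodup_mem_iff {l1 l2 : List Int} (h1 : l1.Nodup) (h2 : l2.Nodup)
    (h : ∀ x, x ∈ l1 ↔ x ∈ l2) : l1.Perm l2 := by
  apply List.perm_of_nodup_nodup_toFinset_eq h1 h2
  ext x
  simp [h x]

-- the Counter's values are the counts of the distinct elements
theorem counter_values_eq (tangerine : List Int) :
    (PySem.Dict.counter tangerine).values
      = (PySem.Set.ofList tangerine).map (fun x => ((tangerine.count x : Int))) := by
  show (PySem.Dict.counter tangerine).items.map (·.2) = _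
  rw [PySem.Dict.items_counter, List.map_map]
  rfl

-- the Counter's values sum to the length of the original list
theorem sum_counter_values (tangerine : List Int) :
    (PySem.Dict.counter tangerine).values.sum = (tangerine.length : Int) := by
  rw [counter_values_eq]
  have hperm : (PySem.Set.ofList tangerine).Perm tangerine.dedup := by
    apply perm_of_nodup_mem_iff (PySem.Set.nodup_ofList tangerine) tangerine.nodup_dedup
    intro x
    rw [PySem.Set.mem_ofList, List.mem_dedup]
  rw [List.Perm.sum_eq (hperm.map _)]
  rw [← List.sum_map_count_dedup_eq_length tangerine]
  induction tangerine.dedup with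
  | nil => simp
  | cons a t iht => simp only [List.map_cons, List.sum_cons, iht]; push_cast; ring

-- every Counter value is positive
theorem counter_values_pos (tangerine : List Int) :
    ∀ v ∈ (PySem.Dict.counter tangerine).values, 0 < v := by
  intro v hv
  rw [counter_values_eq] at hv
  obtain ⟨x, hx, rfl⟩ := List.mem_map.mp hv
  have hxm : x ∈ tangerine := (PySem.Set.mem_ofList tangerine x).mp hx
  have := List.count_pos_iff.mpr hxm
  omega

-- A's descending count walk is the reverse of B's ascending one
theorem desc_eq_reverse_asc (tangerine : List Int) :
    (PySem.List.sorted (PySem.Dict.counter tangerine).items (fun x => x.2) true).map Prod.snd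
      = (PySem.List.sorted (PySem.Dict.counter tangerine).values (fun x => x) false).reverse := by
  set d := PySem.Dict.counter tangerine with hd
  have hpw1 : ((PySem.List.sorted d.items (fun x => x.2) true).map Prod.snd).Pairwise (· ≥ ·) := by
    rw [List.pairwise_map]
    exact (PySem.List.sorted_pairwise_rev d.items (fun x => x.2)).imp (fun h => h)
  have hpw2 : ((PySem.List.sorted d.values (fun x => x) false).reverse).Pairwise (· ≥ ·) := by
    rw [List.pairwise_reverse]
    exact (PySem.List.sorted_pairwise d.values (fun x => x)).imp (fun h => h)
  have hperm1 : ((PySem.List.sorted d.items (fun x => x.2) true).map Prod.snd).Perm d.values :=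
    (PySem.List.sorted_perm d.items (fun x => x.2) true).map Prod.snd
  have hperm2 : ((PySem.List.sorted d.values (fun x => x) false).reverse).Perm d.values :=
    (List.reverse_perm _).trans (PySem.List.sorted_perm d.values (fun x => x) false)
  exact List.Perm.eq_of_pairwise (fun a b _ _ hab hba => le_antisymm hba hab)
    hpw1 hpw2 (hperm1.trans hperm2.symm)

-- ===== VERDICT (by name: the statement is the Claim_ definition above) =====
theorem solution_spec : Claim_equal_solution := by
  intro k tangerine _ hpre
  obtain ⟨hne, hkn⟩ := hpre
  show solution k tangerine = solution_alt k tangerine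
  have hA : solution k tangerine
      = solLoopA (PySem.List.sorted (PySem.Dict.counter tangerine).items (fun x => x.2) true) k 0 := rfl
  have hB : solution_alt k tangerine
      = ((PySem.List.sorted (PySem.Dict.counter tangerine).values (fun x => x) false).length : Int)
        - dropLoop (PySem.List.slice
            (PySem.List.sorted (PySem.Dict.counter tangerine).values (fun x => x) false) none (some (-1)))
            ((tangerine.length : Int) - k) 0 := rfl
  rw [hA, hB, PySem.List.slice_to_neg_one]
  have hsum : (PySem.List.sorted (PySem.Dict.counter tangerine).values (fun x => x) false).sum
      = (tangerine.length : Int) := by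
    rw [List.Perm.sum_eq (PySem.List.sorted_perm _ _ _), sum_counter_values]
  have hpos : ∀ v ∈ (PySem.List.sorted (PySem.Dict.counter tangerine).values (fun x => x) false), 0 < v := by
    intro v hv
    exact counter_values_pos tangerine v ((PySem.List.mem_sorted _ _ _ _).mp hv)
  have hAne : PySem.List.sorted (PySem.Dict.counter tangerine).items (fun x => x.2) true ≠ [] := by
    rw [Ne, PySem.List.sorted_eq_nil_iff]
    intro hit
    obtain ⟨a, ha⟩ := List.exists_mem_of_ne_nil _ hne
    have : a ∈ PySem.Set.ofList tangerine := (PySem.Set.mem_ofList tangerine a).mpr ha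
    have hmem : (a, (tangerine.count a : Int)) ∈ (PySem.Dict.counter tangerine).items := by
      rw [PySem.Dict.items_counter]
      exact List.mem_map.mpr ⟨a, this, rfl⟩
    rw [hit] at hmem
    exact absurd hmem (List.not_mem_nil)
  rw [solLoopA_eq_gHit _ k 0 hAne (by rw [desc_eq_reverse_asc, List.sum_reverse, hsum]; exact hkn)]
  rw [desc_eq_reverse_asc]
  rw [gHit_reverse_eq _ k hpos (by rw [hsum]; exact hkn)]
  rw [dropLoop_eq_dropCnt, hsum]
  omega
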